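-- pv_equiv track=rewrite | github.com/jorgeDonis/AudioTranscription | PrimusDataset.py | _num_repeated_tokens
-- ===== SOURCE A (Python) =====
-- def _num_repeated_tokens(class_index_seq):
--     num_repeated_tokens = 0
--     if len(class_index_seq) == 0:
--         return num_repeated_tokens
--     previous_token = class_index_seq[0]
--     for i in range(1, len(class_index_seq)):
--         if class_index_seq[i] == previous_token:
--             num_repeated_tokens += 1
--         previous_token = class_index_seq[i]
--     return num_repeated_tokens
-- ===== SOURCE B (Python) =====
-- from itertools import groupby
--
-- def _num_repeated_tokens(class_index_seq):
--     return len(class_index_seq) - sum(1 for _ in groupby(class_index_seq))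
-- ===== Notes on version B (the rewrite author's own statement) =====
-- stated objective: idiomatic
-- what changed: Replaced the explicit previous-token comparison loop by run-length grouping: the answer is len(seq) minus the number of maximal runs found by itertools.groupby (each run of length L contributes L-1 repeats).
import Mathlib
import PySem

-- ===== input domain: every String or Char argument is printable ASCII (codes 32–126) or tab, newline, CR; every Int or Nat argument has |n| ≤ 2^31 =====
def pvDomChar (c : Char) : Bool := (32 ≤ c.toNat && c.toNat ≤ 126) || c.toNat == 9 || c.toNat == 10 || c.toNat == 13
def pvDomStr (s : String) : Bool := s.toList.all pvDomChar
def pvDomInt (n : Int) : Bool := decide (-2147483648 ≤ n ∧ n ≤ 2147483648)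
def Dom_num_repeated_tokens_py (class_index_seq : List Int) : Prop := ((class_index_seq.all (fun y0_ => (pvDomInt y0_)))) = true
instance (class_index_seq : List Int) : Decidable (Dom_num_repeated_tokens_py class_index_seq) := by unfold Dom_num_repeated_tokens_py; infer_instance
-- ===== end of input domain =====

-- B counts repeats as length minus the number of maximal runs of equal tokens (groupby identity); alternative decomposition, same cost.
-- ===== PORT A =====
def num_repeated_tokens_py (class_index_seq : List Int) : Int :=
  let num_repeated_tokens : Int := 0
  match class_index_seq with
  | [] => num_repeated_tokens
  | x0 :: _ =>
    -- previous_token := class_index_seq[0]; for i in range(1, len): …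
    let st := (PySem.List.pyRange 1 class_index_seq.length 1).foldl
      (fun (st : Int × Int) i =>
        let t := PySem.List.pyGetD class_index_seq i 0   -- index always in range here
        (if t == st.2 then st.1 + 1 else st.1, t))
      (num_repeated_tokens, x0)
    st.1

-- ===== PORT B =====
-- number of maximal runs of equal consecutive tokens (= sum(1 for _ in groupby(seq)))
def pvNumGroups : List Int → Int
  | [] => 0
  | [_] => 1
  | x :: y :: t => (if x == y then 0 else 1) + pvNumGroups (y :: t)

def num_repeated_tokens_py_alt (class_index_seq : List Int) : Int :=
  (class_index_seq.length : Int) - pvNumGroups class_index_seq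

-- ===== PRECONDITION & SPEC =====
def Spec_num_repeated_tokens_py (class_index_seq : List Int) (out : Int) : Prop := out = num_repeated_tokens_py_alt class_index_seq
instance (class_index_seq : List Int) (out : Int) : Decidable (Spec_num_repeated_tokens_py class_index_seq out) := by unfold Spec_num_repeated_tokens_py; infer_instance

-- ===== CLAIM (what is proved, stated in full; the proofs are below) =====
def Claim_equal_num_repeated_tokens_py : Prop := ∀ (class_index_seq : List Int), Dom_num_repeated_tokens_py class_index_seq → Spec_num_repeated_tokens_py class_index_seq (num_repeated_tokens_py class_index_seq)

-- ===== LEMMAS AND PROOFS =====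

-- ===== VERDICT (by name: the statement is the Claim_ definition above) =====
-- repeats of t against a previous token p: what A's loop accumulates
def pvRep (p : Int) : List Int → Int
  | [] => 0
  | x :: t => (if x == p then 1 else 0) + pvRep x t

theorem pvFoldA (t : List Int) : ∀ (c p : Int),
    (t.foldl (fun (st : Int × Int) x => (if x == st.2 then st.1 + 1 else st.1, x)) (c, p)).1
      = c + pvRep p t := by
  induction t with
  | nil => intro c p; simp [pvRep]
  | cons x t ih =>
    intro c p
    simp only [List.foldl_cons, pvRep, ih]
    split_ifs <;> simp_all
    ring

theorem pvGroups (t : List Int) : ∀ (x : Int),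
    (1 + (t.length : Int)) - pvNumGroups (x :: t) = pvRep x t := by
  induction t with
  | nil => intro x; simp [pvNumGroups, pvRep]
  | cons y t ih =>
    intro x
    have h := ih y
    simp only [pvNumGroups, pvRep, List.length_cons] at *
    by_cases hxy : x = y
    · subst hxy
      simp only [beq_self_eq_true, if_pos] at *
      push_cast at *
      omega
    · have hyx : ¬ y = x := fun e => hxy e.symm
      simp only [beq_iff_eq, hxy, hyx, if_neg, not_false_iff] at *
      push_cast at *
      omega

theorem num_repeated_tokens_py_spec : Claim_equal_num_repeated_tokens_py := by
  intro xs _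
  unfold Spec_num_repeated_tokens_py num_repeated_tokens_py num_repeated_tokens_py_alt
  cases xs with
  | nil => simp [pvNumGroups]
  | cons x t =>
    simp only
    rw [PySem.List.foldl_pyRange_pyGetD' (xs := x :: t) (d := 0)
      (f := fun (st : Int × Int) v => (if v == st.2 then st.1 + 1 else st.1, v))
      (init := ((0 : Int), x)) (a := 1) (by norm_num)]
    simp only [Int.toNat_one, List.drop_succ_cons, List.drop_zero]
    rw [pvFoldA]
    have h := pvGroups t x
    simp only [List.length_cons]
    push_cast
    omega
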